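-- pv_equiv track=rewrite | github.com/richardslab/EXWAS_pipeline | python_scripts/python_helpers/vep_helpers/parse_vep.py | __parse_polyphen2_hdiv
-- ===== SOURCE A (Python) =====
-- def __parse_polyphen2_hdiv(consequence,consequence_elem,POLYPHEN2_HDIV_ORDER):
--   p2hdiv_order = [x.upper().strip() for x in consequence_elem[1].split(",")]
--   p2hdiv_order = [x for x in p2hdiv_order if x!='.']
--   if len(p2hdiv_order) == 0:
--     return None
--   assert(
--     all(
--       [x in POLYPHEN2_HDIV_ORDER for x in p2hdiv_order]
--     )
--   ),f"invalid Polyphen2 HDIV results {consequence}"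
--
--   # the first occurence is the most severe
--   for i in POLYPHEN2_HDIV_ORDER:
--     if i in p2hdiv_order:
--       return i
--   assert False
-- ===== SOURCE B (Python) =====
-- def __parse_polyphen2_hdiv(consequence, consequence_elem, POLYPHEN2_HDIV_ORDER):
--   p2hdiv_order = [x.upper().strip() for x in consequence_elem[1].split(",")]
--   p2hdiv_order = [x for x in p2hdiv_order if x != '.']
--   if not p2hdiv_order:
--     return None
--   assert all(x in POLYPHEN2_HDIV_ORDER for x in p2hdiv_order), f"invalid Polyphen2 HDIV results {consequence}"
--   # rank each observed token by its priority index and take the most severe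
--   return min(p2hdiv_order, key=POLYPHEN2_HDIV_ORDER.index)
-- ===== Notes on version B (the rewrite author's own statement) =====
-- stated objective: idiomatic
-- what changed: Selection is driven by the data instead of the priority table: B takes min over the parsed tokens keyed by POLYPHEN2_HDIV_ORDER.index, where A scans POLYPHEN2_HDIV_ORDER and returns the first entry contained in the token list.
import Mathlib
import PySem

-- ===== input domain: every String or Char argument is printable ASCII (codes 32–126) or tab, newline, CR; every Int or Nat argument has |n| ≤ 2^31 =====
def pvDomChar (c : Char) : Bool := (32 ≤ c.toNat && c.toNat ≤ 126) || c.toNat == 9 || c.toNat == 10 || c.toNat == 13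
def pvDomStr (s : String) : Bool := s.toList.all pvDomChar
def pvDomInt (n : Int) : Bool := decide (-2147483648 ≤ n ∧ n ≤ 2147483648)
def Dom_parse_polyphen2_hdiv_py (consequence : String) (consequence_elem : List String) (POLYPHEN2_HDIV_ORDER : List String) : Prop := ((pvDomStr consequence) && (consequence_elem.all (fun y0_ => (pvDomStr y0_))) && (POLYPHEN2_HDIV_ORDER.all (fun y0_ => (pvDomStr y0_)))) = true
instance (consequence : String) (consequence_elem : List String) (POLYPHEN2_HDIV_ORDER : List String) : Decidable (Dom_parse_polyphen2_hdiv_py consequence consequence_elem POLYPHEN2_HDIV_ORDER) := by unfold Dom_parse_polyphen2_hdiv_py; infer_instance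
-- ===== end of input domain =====

-- B selects the most severe token by ranking the parsed tokens with an index lookup
-- (min over the data) instead of scanning the priority table for the first member (A);
-- objective: idiomatic, same cost.

-- shared parse (identical lines in both Pythons):
-- [x.upper().strip() for x in e1.split(",")] filtered of '.'
def pvTokens (e1 : String) : List String :=
  ((((PySem.Str.split? e1 ",").getD []).map (fun x => PySem.Str.strip (PySem.Str.upper x))).filter
    (fun x => x ≠ "."))

-- ===== PORT A =====
def parse_polyphen2_hdiv_py (consequence : String) (consequence_elem : List String) (POLYPHEN2_HDIV_ORDER : List String) : Option String :=
  match PySem.List.pyGet? consequence_elem 1 with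
  | none => none   -- IndexError: excluded by Pre_
  | some e1 =>
    let p2hdiv_order := pvTokens e1
    if p2hdiv_order.length = 0 then none
    else if p2hdiv_order.all (fun x => POLYPHEN2_HDIV_ORDER.contains x) then
      -- for i in POLYPHEN2_HDIV_ORDER: if i in p2hdiv_order: return i
      match POLYPHEN2_HDIV_ORDER.find? (fun i => p2hdiv_order.contains i) with
      | some i => some i
      | none => none   -- assert False: unreachable under the membership check
    else none          -- AssertionError: excluded by Pre_

-- ===== PORT B =====
-- POLYPHEN2_HDIV_ORDER.index t (total under the assert; default irrelevant there)
def pvIdx (order : List String) (t : String) : Nat :=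
  (PySem.List.index? order t).getD 0

def parse_polyphen2_hdiv_py_alt (consequence : String) (consequence_elem : List String) (POLYPHEN2_HDIV_ORDER : List String) : Option String :=
  match PySem.List.pyGet? consequence_elem 1 with
  | none => none   -- IndexError: excluded by Pre_
  | some e1 =>
    match pvTokens e1 with
    | [] => none
    | h :: rest =>
      if (h :: rest).all (fun x => POLYPHEN2_HDIV_ORDER.contains x) then
        -- min(p2hdiv_order, key=POLYPHEN2_HDIV_ORDER.index): first-minimal by rank
        some (rest.foldl
          (fun b t => if pvIdx POLYPHEN2_HDIV_ORDER t < pvIdx POLYPHEN2_HDIV_ORDER b then t else b) h)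
      else none      -- AssertionError: excluded by Pre_

-- ===== PRECONDITION & SPEC =====
-- Pre_ excludes exactly the inputs where A raises: a consequence_elem without a
-- second field (IndexError) and parsed tokens outside POLYPHEN2_HDIV_ORDER (AssertionError).
def Pre_parse_polyphen2_hdiv_py (consequence : String) (consequence_elem : List String) (POLYPHEN2_HDIV_ORDER : List String) : Prop :=
  2 ≤ consequence_elem.length ∧
    ∀ t ∈ pvTokens (consequence_elem.getD 1 ""), t ∈ POLYPHEN2_HDIV_ORDER
instance (consequence : String) (consequence_elem : List String) (POLYPHEN2_HDIV_ORDER : List String) : Decidable (Pre_parse_polyphen2_hdiv_py consequence consequence_elem POLYPHEN2_HDIV_ORDER) := by unfold Pre_parse_polyphen2_hdiv_py; infer_instance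

def pvWitness_parse_polyphen2_hdiv_py : String × List String × List String :=
  ("c", ["x", "benign, Probably_damaging ,."], ["PROBABLY_DAMAGING", "POSSIBLY_DAMAGING", "BENIGN"])

def Spec_parse_polyphen2_hdiv_py (consequence : String) (consequence_elem : List String) (POLYPHEN2_HDIV_ORDER : List String) (out : Option String) : Prop := out = parse_polyphen2_hdiv_py_alt consequence consequence_elem POLYPHEN2_HDIV_ORDER
instance (consequence : String) (consequence_elem : List String) (POLYPHEN2_HDIV_ORDER : List String) (out : Option String) : Decidable (Spec_parse_polyphen2_hdiv_py consequence consequence_elem POLYPHEN2_HDIV_ORDER out) := by unfold Spec_parse_polyphen2_hdiv_py; infer_instance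

-- ===== CLAIM (what is proved, stated in full; the proofs are below) =====
def Claim_equal_parse_polyphen2_hdiv_py : Prop := ∀ (consequence : String) (consequence_elem : List String) (POLYPHEN2_HDIV_ORDER : List String), Dom_parse_polyphen2_hdiv_py consequence consequence_elem POLYPHEN2_HDIV_ORDER → Pre_parse_polyphen2_hdiv_py consequence consequence_elem POLYPHEN2_HDIV_ORDER → Spec_parse_polyphen2_hdiv_py consequence consequence_elem POLYPHEN2_HDIV_ORDER (parse_polyphen2_hdiv_py consequence consequence_elem POLYPHEN2_HDIV_ORDER)

-- ===== LEMMAS AND PROOFS =====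

-- find? returns the element at the first index satisfying p
theorem find?_eq_getElem {α : Type} (p : α → Bool) (l : List α) (k : Nat) (hk : k < l.length)
    (hpk : p (l.get ⟨k, hk⟩) = true)
    (hlt : ∀ j (hj : j < l.length), j < k → p (l.get ⟨j, hj⟩) = false) :
    l.find? p = some (l.get ⟨k, hk⟩) := by
  induction l generalizing k with
  | nil => simp at hk
  | cons a l ih =>
    cases k with
    | zero =>
      have hpa : p a = true := hpk
      simp [List.find?, hpa]
    | succ k =>
      have h0 : p a = false := hlt 0 (by simp) (Nat.succ_pos _)
      simp only [List.find?, h0]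
      exact ih k (Nat.lt_of_succ_lt_succ hk) hpk
        (fun j hj hjk => hlt (j + 1) (Nat.succ_lt_succ hj) (Nat.succ_lt_succ hjk))

theorem foldl_best_mem (order : List String) (h : String) (rest : List String) :
    rest.foldl (fun b t => if pvIdx order t < pvIdx order b then t else b) h ∈ h :: rest := by
  induction rest generalizing h with
  | nil => simp
  | cons t rest ih =>
    simp only [List.foldl_cons]
    split_ifs with hc
    · rcases List.mem_cons.mp (ih t) with h2 | h2 <;> simp [h2]
    · rcases List.mem_cons.mp (ih h) with h2 | h2 <;> simp [h2]

theorem foldl_best_min (order : List String) (h : String) (rest : List String) :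
    ∀ t ∈ h :: rest,
      pvIdx order (rest.foldl (fun b t => if pvIdx order t < pvIdx order b then t else b) h)
        ≤ pvIdx order t := by
  induction rest generalizing h with
  | nil => intro t ht; simp at ht; simp [ht]
  | cons u rest ih =>
    intro t ht
    simp only [List.foldl_cons]
    split_ifs with hc
    · rcases List.mem_cons.mp ht with heq | ht'
      · rw [heq]; exact le_trans (ih u u (by simp)) (le_of_lt hc)
      · exact ih u t ht'
    · rcases List.mem_cons.mp ht with heq | ht'
      · rw [heq]; exact ih h h (by simp)
      · rcases List.mem_cons.mp ht' with heq | ht''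
        · rw [heq]; exact le_trans (ih h h (by simp)) (le_of_not_gt hc)
        · exact ih h t (by simp [ht''])

-- main bridge: the first member of `order` found in ts equals the min-by-index of ts
theorem find?_eq_best (order : List String) (h : String) (rest : List String)
    (hall : ∀ t ∈ h :: rest, t ∈ order) :
    order.find? (fun i => (h :: rest).contains i) =
      some (rest.foldl (fun b t => if pvIdx order t < pvIdx order b then t else b) h) := by
  have hbmem := foldl_best_mem order h rest
  have hbmin := foldl_best_min order h rest
  set b := rest.foldl (fun b t => if pvIdx order t < pvIdx order b then t else b) h with hb
  have hbord : b ∈ order := hall b hbmem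
  obtain ⟨k, hik⟩ : ∃ k, PySem.List.index? order b = some k :=
    Option.isSome_iff_exists.mp ((PySem.List.index?_isSome_iff (xs := order) (v := b)).mpr hbord)
  obtain ⟨hk, hkb, hkfirst⟩ := PySem.List.getElem_of_index?_eq_some hik
  have hidxb : pvIdx order b = k := by unfold pvIdx; rw [hik]; rfl
  have hres := find?_eq_getElem (fun i => (h :: rest).contains i) order k hk
    (by
      simp only [List.get_eq_getElem, hkb]
      simpa using hbmem)
    (by
      intro j hj hjk
      simp only [List.get_eq_getElem]
      by_contra hcon
      have hctrue : (h :: rest).contains order[j] = true :=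
        by
        cases hcb : (h :: rest).contains order[j] with
        | true => rfl
        | false => exact absurd hcb hcon
      have hmem : order[j] ∈ h :: rest := by simpa using hctrue
      have hle : pvIdx order b ≤ pvIdx order order[j] := hbmin order[j] hmem
      obtain ⟨m, him⟩ : ∃ m, PySem.List.index? order (order[j]) = some m :=
        Option.isSome_iff_exists.mp
          ((PySem.List.index?_isSome_iff (xs := order) (v := order[j])).mpr (List.getElem_mem hj))
      obtain ⟨hm, hmb, hmfirst⟩ := PySem.List.getElem_of_index?_eq_some him
      have hmj : m ≤ j := by
        by_contra hgt
        exact hmfirst j (by omega) rfl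
      have hidxj : pvIdx order order[j] = m := by unfold pvIdx; rw [him]; rfl
      omega)
  rw [hres]
  simp only [List.get_eq_getElem, hkb]

theorem parse_eq (consequence : String) (consequence_elem : List String)
    (order : List String)
    (hpre : Pre_parse_polyphen2_hdiv_py consequence consequence_elem order) :
    parse_polyphen2_hdiv_py consequence consequence_elem order =
      parse_polyphen2_hdiv_py_alt consequence consequence_elem order := by
  obtain ⟨hlen, hall⟩ := hpre
  have hget : PySem.List.pyGet? consequence_elem 1 = some (consequence_elem.getD 1 "") := by
    have h1 : 1 < consequence_elem.length := by omega
    rw [show (1 : Int) = ((1 : Nat) : Int) by rfl, PySem.List.pyGet?_natCast]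
    simp [List.getD, List.getElem?_eq_getElem h1]
  unfold parse_polyphen2_hdiv_py parse_polyphen2_hdiv_py_alt
  rw [hget]
  simp only
  cases hts : pvTokens (consequence_elem.getD 1 "") with
  | nil => simp
  | cons h rest =>
    rw [hts] at hall
    have hallb : (h :: rest).all (fun x => order.contains x) = true := by
      simp only [List.all_eq_true]
      intro x hx
      exact List.elem_eq_true_of_mem (hall x hx)
    simp only [List.length_cons, hallb, if_pos, Nat.succ_ne_zero]
    rw [find?_eq_best order h rest hall]
    simp

-- ===== VERDICT (by name: the statement is the Claim_ definition above) =====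
theorem parse_polyphen2_hdiv_py_spec : Claim_equal_parse_polyphen2_hdiv_py := by
  intro consequence consequence_elem order _ hpre
  exact parse_eq consequence consequence_elem order hpre
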